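-- pv_equiv track=rewrite | github.com/dylanstephenalexander/repertoire | backend/app/services/opening_detect.py | _common_label
-- ===== SOURCE A (Python) =====
-- def _common_label(names: set[str]) -> str | None:
--     """
--     Return the most specific name consistent with every name in *names*.
--
--     Names have the form "Opening" or "Opening: Variation".  Rules:
--       - If the openings differ → None (ambiguous)
--       - If the opening is the same but variations differ (or some lines have no
--         variation) → return just the opening name
--       - If every name agrees on opening AND variation → return the full name
--     """
--     if not names:
--         return None
--
--     openings: set[str] = set()
--     variations: set[str | None] = set()
--     for name in names:
--         if ": " in name:
--             opening, variation = name.split(": ", 1)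
--         else:
--             opening, variation = name, None
--         openings.add(opening)
--         variations.add(variation)
--
--     if len(openings) != 1:
--         return None  # Spans multiple openings — too early to name
--
--     common_opening = next(iter(openings))
--
--     if len(variations) == 1 and None not in variations:
--         return f"{common_opening}: {next(iter(variations))}"
--
--     return common_opening
-- ===== SOURCE B (Python) =====
-- def _common_label(names: set[str]) -> str | None:
--     # Simpler decomposition: empty -> None; a single name is already the most
--     # specific label; otherwise (>= 2 distinct names) full agreement is
--     # impossible, so only the opening prefix can be common: collect just the
--     # prefixes and return the opening iff there is exactly one.
--     if not names:
--         return None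
--     if len(names) == 1:
--         return next(iter(names))
--     prefixes = {name.split(": ", 1)[0] for name in names}
--     if len(prefixes) == 1:
--         return next(iter(prefixes))
--     return None
-- ===== Notes on version B (the rewrite author's own statement) =====
-- stated objective: simpler
-- what changed: B drops A's variations set and its reconstruction of the full name entirely: it returns the sole element directly when the set has one name (that element is already the most specific label), and for two or more distinct names it builds only the set of opening prefixes, returning the opening iff that set is a singleton.
import Mathlib
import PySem

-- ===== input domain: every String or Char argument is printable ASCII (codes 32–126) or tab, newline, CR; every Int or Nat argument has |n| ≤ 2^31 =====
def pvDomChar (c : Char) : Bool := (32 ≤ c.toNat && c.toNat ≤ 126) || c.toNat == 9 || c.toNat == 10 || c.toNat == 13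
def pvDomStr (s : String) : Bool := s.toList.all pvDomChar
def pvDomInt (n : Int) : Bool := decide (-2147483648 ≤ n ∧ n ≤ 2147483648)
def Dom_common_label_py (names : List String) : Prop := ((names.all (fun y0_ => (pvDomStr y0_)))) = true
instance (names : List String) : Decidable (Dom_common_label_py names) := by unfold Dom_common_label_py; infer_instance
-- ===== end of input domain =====

-- B returns the sole name directly when the set is a singleton and otherwise compares only
-- the opening prefixes, dropping A's variations set: a simpler decomposition, same cost.


-- ===== PORT A =====
-- A's per-name computation of (opening, variation); the `_ => (name, none)` fallback of the
-- match is unreachable (split on a contained ": " always yields two parts, proved below).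
def splitLabelA (name : String) : String × Option String :=
  if PySem.Str.isIn ": " name then
    match PySem.Str.splitMax? name ": " 1 with
    | some (opening :: variation :: _) => (opening, some variation)
    | _ => (name, none)
  else (name, none)

def common_label_py (names : List String) : Option String :=
  if names = [] then none
  else
    let p : PySem.Set String × PySem.Set (Option String) :=
      names.foldl
        (fun st name =>
          let ov := splitLabelA name
          (PySem.Set.add st.1 ov.1, PySem.Set.add st.2 ov.2))
        (PySem.Set.empty, PySem.Set.empty)
    if PySem.Set.len p.1 ≠ 1 then none
    else
      let common_opening := p.1.headD ""
      if PySem.Set.len p.2 = 1 ∧ PySem.Set.contains p.2 none = false then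
        -- f"{common_opening}: {variation}"
        some (PySem.Str.join "" [common_opening, ": ", (p.2.headD none).getD ""])
      else some common_opening

-- ===== PORT B =====
def common_label_py_alt (names : List String) : Option String :=
  match names with
  | [] => none
  | [only] => some only
  | _ =>
    let prefixes : PySem.Set String :=
      PySem.Set.ofList (names.map (fun name => ((PySem.Str.splitMax? name ": " 1).getD []).headD name))
    if PySem.Set.len prefixes = 1 then some (prefixes.headD "") else none

-- ===== PRECONDITION & SPEC =====
-- The Python argument is a set[str]; by the type convention the List String must carry
-- DISTINCT elements. Pre_ states exactly that: a list with duplicates does not denote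
-- any Python set, so nothing is claimed there.
def Pre_common_label_py (names : List String) : Prop := names.Nodup
instance (names : List String) : Decidable (Pre_common_label_py names) := by unfold Pre_common_label_py; infer_instance
def pvWitness_common_label_py : List String := ["Sicilian: Najdorf", "Sicilian: Dragon"]
def Spec_common_label_py (names : List String) (out : Option String) : Prop := out = common_label_py_alt names
instance (names : List String) (out : Option String) : Decidable (Spec_common_label_py names out) := by unfold Spec_common_label_py; infer_instance

-- ===== CLAIM (what is proved, stated in full; the proofs are below) =====
def Claim_equal_common_label_py : Prop := ∀ (names : List String), Dom_common_label_py names → Pre_common_label_py names → Spec_common_label_py names (common_label_py names)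

-- ===== LEMMAS AND PROOFS =====

-- go with maxsplit budget 0 stops at once: the remainder is flushed into the current piece.
theorem go_zero (sep : List Char) (fuel : Nat) (l cur : List Char) (acc : List (List Char)) :
    PySem.Chars.splitOnMax.go sep fuel 0 l cur acc = ((cur.reverse ++ l) :: acc).reverse := by
  cases fuel with
  | zero => simp [PySem.Chars.splitOnMax.go]
  | succ n => cases l <;> simp [PySem.Chars.splitOnMax.go]

-- if sep does not occur, go with budget 1 returns the whole rest as one piece (any fuel).
theorem go_one_no_sep (sep : List Char) (fuel : Nat) :
    ∀ (l cur : List Char) (acc : List (List Char)), ¬ sep <:+: l →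
    PySem.Chars.splitOnMax.go sep fuel 1 l cur acc = ((cur.reverse ++ l) :: acc).reverse := by
  induction fuel with
  | zero => intro l cur acc _; simp [PySem.Chars.splitOnMax.go]
  | succ n ih =>
    intro l cur acc h
    cases l with
    | nil => simp [PySem.Chars.splitOnMax.go]
    | cons c rest =>
      have hpre : sep.isPrefixOf (c :: rest) = false := by
        by_contra h'
        exact h ((List.isPrefixOf_iff_prefix).1 (by simpa using h')).isInfix
      have hrest : ¬ sep <:+: rest := fun h' => h (List.infix_cons_iff.2 (Or.inr h'))
      simp only [PySem.Chars.splitOnMax.go, hpre, if_neg (one_ne_zero), Bool.false_eq_true,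
        if_false]
      rw [ih rest (c :: cur) acc hrest]
      simp

-- if sep occurs, go with budget 1 splits at its first occurrence (enough fuel).
theorem go_one_sep (sep : List Char) (hsep : sep ≠ []) (fuel : Nat) :
    ∀ (l cur : List Char) (acc : List (List Char)), l.length < fuel → sep <:+: l →
    ∃ pre post, PySem.Chars.splitOnMax.go sep fuel 1 l cur acc
        = acc.reverse ++ [cur.reverse ++ pre, post] ∧ l = pre ++ sep ++ post := by
  induction fuel with
  | zero => intro l cur acc h _; omega
  | succ n ih =>
    intro l cur acc hfuel hin
    cases l with
    | nil =>
      exact absurd (List.eq_nil_of_infix_nil hin) hsep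
    | cons c rest =>
      by_cases hpre : sep.isPrefixOf (c :: rest) = true
      · refine ⟨[], (c :: rest).drop sep.length, ?_, ?_⟩
        · simp only [PySem.Chars.splitOnMax.go, hpre, if_neg (one_ne_zero), if_true]
          rw [go_zero]
          simp
        · have := (List.isPrefixOf_iff_prefix).1 hpre
          obtain ⟨t, ht⟩ := this
          simp [← ht]
      · have hpre' : sep.isPrefixOf (c :: rest) = false := Bool.eq_false_iff.mpr hpre
        have hrest : sep <:+: rest := by
          rcases List.infix_cons_iff.1 hin with h' | h'
          · exact absurd ((List.isPrefixOf_iff_prefix).2 h') hpre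
          · exact h'
        have hlen : rest.length < n := by simp at hfuel; omega
        obtain ⟨pre, post, hgo, hsplit⟩ := ih rest (c :: cur) acc hlen hrest
        refine ⟨c :: pre, post, ?_, ?_⟩
        · simp only [PySem.Chars.splitOnMax.go, hpre', if_neg (one_ne_zero), Bool.false_eq_true,
            if_false]
          rw [hgo]; simp
        · simp [hsplit]

theorem splitOnMax_one_no_sep (sep s : List Char) (h : ¬ sep <:+: s) :
    PySem.Chars.splitOnMax s sep 1 = [s] := by
  rw [PySem.Chars.splitOnMax]
  rw [if_neg (by norm_num)]
  rw [show (1 : Int).toNat = 1 from rfl, go_one_no_sep sep _ s [] [] h]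
  simp

theorem splitOnMax_one_sep (sep s : List Char) (hsep : sep ≠ []) (h : sep <:+: s) :
    ∃ pre post, PySem.Chars.splitOnMax s sep 1 = [pre, post] ∧ s = pre ++ sep ++ post := by
  rw [PySem.Chars.splitOnMax]
  rw [if_neg (by norm_num)]
  rw [show (1 : Int).toNat = 1 from rfl]
  obtain ⟨pre, post, hgo, hs⟩ := go_one_sep sep hsep (s.length + 1) s [] [] (by omega) h
  exact ⟨pre, post, by rw [hgo]; simp, hs⟩

-- String-level characterisation of name.split(": ", 1).
theorem str_split_no_sep (n : String) (h : PySem.Str.isIn ": " n = false) :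
    PySem.Str.splitMax? n ": " 1 = some [n] := by
  have h' : ¬ (": ").toList <:+: n.toList := by
    rw [← PySem.Chars.isIn_iff_infix, ← PySem.Str.isIn_eq, h]; simp
  rw [PySem.Str.splitMax?, PySem.Chars.splitMax?, if_neg (by decide),
    splitOnMax_one_no_sep _ _ h']
  simp [String.ofList_toList]

theorem str_split_sep (n : String) (h : PySem.Str.isIn ": " n = true) :
    ∃ pre post, PySem.Str.splitMax? n ": " 1 = some [String.ofList pre, String.ofList post]
      ∧ n.toList = pre ++ (": ").toList ++ post := by
  have h' : (": ").toList <:+: n.toList := by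
    rw [← PySem.Chars.isIn_iff_infix, ← PySem.Str.isIn_eq]; exact h
  obtain ⟨pre, post, heq, hs⟩ := splitOnMax_one_sep (": ").toList n.toList (by decide) h'
  refine ⟨pre, post, ?_, hs⟩
  rw [PySem.Str.splitMax?, PySem.Chars.splitMax?, if_neg (by decide), heq]
  rfl

-- facts about A's per-name helper
theorem splitLabelA_nosep (n : String) (hin : PySem.Str.isIn ": " n = false) :
    splitLabelA n = (n, none) := by
  unfold splitLabelA
  rw [if_neg (by simp only [PySem.Str.isIn_eq, show (": ").toList = [':', ' '] from by decide] at hin; simp [hin])]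

theorem splitLabelA_sep (n : String) (hin : PySem.Str.isIn ": " n = true) :
    ∃ pre post, splitLabelA n = (String.ofList pre, some (String.ofList post))
      ∧ n.toList = pre ++ (": ").toList ++ post := by
  obtain ⟨pre, post, heq, hs⟩ := str_split_sep n hin
  refine ⟨pre, post, ?_, hs⟩
  unfold splitLabelA
  rw [if_pos hin, heq]

theorem splitLabelA_none_fst (n : String) (h : (splitLabelA n).2 = none) :
    (splitLabelA n).1 = n := by
  cases hin : PySem.Str.isIn ": " n with
  | false => rw [splitLabelA_nosep n hin]
  | true =>
    obtain ⟨pre, post, hA, _⟩ := splitLabelA_sep n hin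
    rw [hA] at h
    simp at h

theorem splitLabelA_some (n : String) (v : String) (h : (splitLabelA n).2 = some v) :
    n.toList = (splitLabelA n).1.toList ++ (": ").toList ++ v.toList := by
  cases hin : PySem.Str.isIn ": " n with
  | false =>
    rw [splitLabelA_nosep n hin] at h
    simp at h
  | true =>
    obtain ⟨pre, post, hA, hs⟩ := splitLabelA_sep n hin
    rw [hA] at h ⊢
    simp only [Option.some.injEq] at h
    rw [hs, ← h]
    simp [String.toList_ofList]

-- two names with ": " that agree on opening and variation are equal
theorem splitLabelA_inj (n m v : String) (hn : (splitLabelA n).2 = some v)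
    (hm : (splitLabelA m).2 = some v) (hf : (splitLabelA n).1 = (splitLabelA m).1) :
    n = m := by
  have h1 := splitLabelA_some n v hn
  have h2 := splitLabelA_some m v hm
  rw [← String.toList_inj, h1, h2, hf]

-- B's prefix expression computes exactly A's opening
theorem prefix_eq_fst (n : String) :
    ((PySem.Str.splitMax? n ": " 1).getD []).headD n = (splitLabelA n).1 := by
  cases hin : PySem.Str.isIn ": " n with
  | true =>
    obtain ⟨pre, post, heq, _⟩ := str_split_sep n hin
    unfold splitLabelA
    rw [if_pos hin, heq]
    rfl
  | false =>
    unfold splitLabelA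
    rw [if_neg (by simp only [PySem.Str.isIn_eq, show (": ").toList = [':', ' '] from by decide] at hin; simp [hin]), str_split_no_sep n hin]
    rfl

-- A's fold builds the two sets of the mapped openings / variations
theorem foldA_aux (names : List String) :
    ∀ (a : PySem.Set String) (b : PySem.Set (Option String)),
    names.foldl
        (fun st name =>
          let ov := splitLabelA name
          (PySem.Set.add st.1 ov.1, PySem.Set.add st.2 ov.2))
        (a, b)
      = ((names.map (fun n => (splitLabelA n).1)).foldl PySem.Set.add a,
         (names.map (fun n => (splitLabelA n).2)).foldl PySem.Set.add b) := by
  induction names with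
  | nil => intro a b; rfl
  | cons x xs ih => intro a b; simp only [List.foldl_cons, List.map_cons, ih]

theorem foldA_eq (names : List String) :
    names.foldl
        (fun st name =>
          let ov := splitLabelA name
          (PySem.Set.add st.1 ov.1, PySem.Set.add st.2 ov.2))
        (PySem.Set.empty, PySem.Set.empty)
      = (PySem.Set.ofList (names.map (fun n => (splitLabelA n).1)),
         PySem.Set.ofList (names.map (fun n => (splitLabelA n).2))) := by
  rw [foldA_aux, PySem.Set.ofList_eq_foldl, PySem.Set.ofList_eq_foldl]
  rfl

theorem mem_of_ofList_eq_singleton {α : Type} [BEq α] [LawfulBEq α] (l : List α) (x y : α)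
    (h : PySem.Set.ofList l = [x]) (hy : y ∈ l) : y = x := by
  have : y ∈ PySem.Set.ofList l := (PySem.Set.mem_ofList l y).2 hy
  rw [h] at this
  simpa using this

theorem len_one_eq_singleton {α : Type} (s : PySem.Set α) (h : PySem.Set.len s = 1) :
    ∃ x, s = [x] := by
  have : s.length = 1 := by simpa [PySem.Set.len] using h
  exact List.length_eq_one_iff.1 this

-- ===== VERDICT (by name: the statement is the Claim_ definition above) =====
theorem common_label_py_spec : Claim_equal_common_label_py := by
  intro names _ hnd
  unfold Spec_common_label_py common_label_py common_label_py_alt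
  match names with
  | [] => rfl
  | [a] =>
    simp only [List.foldl_cons, List.foldl_nil, if_neg (by simp : ¬([a] : List String) = [])]
    have hset1 : PySem.Set.add (PySem.Set.empty (α := String)) (splitLabelA a).1
        = [(splitLabelA a).1] := rfl
    have hset2 : PySem.Set.add (PySem.Set.empty (α := Option String)) (splitLabelA a).2
        = [(splitLabelA a).2] := rfl
    simp only [hset1, hset2]
    cases hv : (splitLabelA a).2 with
    | none =>
      rw [if_neg (by simp [PySem.Set.len]), if_neg (by simp [PySem.Set.contains])]
      simp [splitLabelA_none_fst a hv]
    | some v =>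
      rw [if_neg (by simp [PySem.Set.len]),
        if_pos ⟨by simp [PySem.Set.len], by simp [PySem.Set.contains]⟩]
      simp only [List.headD_cons, Option.getD_some, Option.some.injEq]
      rw [← String.toList_inj, PySem.Str.toList_join]
      have := splitLabelA_some a v hv
      simp [PySem.Chars.join, List.intercalate, List.intersperse, this]
  | a :: b :: rest =>
    simp only [if_neg (by simp : ¬(a :: b :: rest : List String) = [])]
    rw [foldA_eq]
    have hmap : (a :: b :: rest).map
        (fun n => ((PySem.Str.splitMax? n ": " 1).getD []).headD n)
        = (a :: b :: rest).map (fun n => (splitLabelA n).1) :=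
      List.map_congr_left (fun n _ => prefix_eq_fst n)
    rw [hmap]
    set L := a :: b :: rest with hL
    by_cases hlen : PySem.Set.len (PySem.Set.ofList (L.map (fun n => (splitLabelA n).1))) = 1
    · obtain ⟨o, ho⟩ := len_one_eq_singleton _ hlen
      have hfo : ∀ n ∈ L, (splitLabelA n).1 = o := fun n hn =>
        mem_of_ofList_eq_singleton _ o _ ho (List.mem_map_of_mem hn)
      have hvar : ¬ (PySem.Set.len (PySem.Set.ofList (L.map (fun n => (splitLabelA n).2))) = 1
          ∧ PySem.Set.contains (PySem.Set.ofList (L.map (fun n => (splitLabelA n).2))) none = false) := by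
        rintro ⟨h1, h2⟩
        obtain ⟨w, hw⟩ := len_one_eq_singleton _ h1
        have hgw : ∀ n ∈ L, (splitLabelA n).2 = w := fun n hn =>
          mem_of_ofList_eq_singleton _ w _ hw (List.mem_map_of_mem hn)
        cases w with
        | none =>
          have hmem : (none : Option String) ∈ PySem.Set.ofList (L.map (fun n => (splitLabelA n).2)) := by
            rw [hw]; simp
          rw [← PySem.Set.contains_iff, h2] at hmem
          simp at hmem
        | some v =>
          have hab : a = b := splitLabelA_inj a b v
            (hgw a (by simp [hL])) (hgw b (by simp [hL]))
            (by rw [hfo a (by simp [hL]), hfo b (by simp [hL])])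
          rw [hL] at hnd
          exact (List.nodup_cons.1 hnd).1 (by simp [hab])
      have hlen' : List.length (PySem.Set.ofList (L.map (fun n => (splitLabelA n).1))) = 1 := by
        rw [ho]; rfl
      rw [if_neg (by simp [PySem.Set.len, hlen']), if_neg hvar, if_pos hlen]
    · rw [if_pos hlen, if_neg hlen]
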